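-- pv_equiv track=rewrite | github.com/TohnoYouki/automatic-rigging | datasets/input_output/parse/dae/skeleton.py | combine_refs
-- ===== SOURCE A (Python) =====
-- def combine_refs(refs):
--     skeletons, skeleton_ids = [], []
--     for indices in refs:
--         skeleton_id = -1
--         for i, skeleton in enumerate(skeletons):
--             if any([x in skeleton for x in indices]):
--                 skeleton_id = i
--         if skeleton_id == -1:
--             skeleton_ids.append(len(skeletons))
--             skeletons.append(indices)
--         else:
--             skeleton_ids.append(skeleton_id)
--             skeletons[skeleton_id].extend(indices)
--     skeletons = [sorted(set(x)) for x in skeletons]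
--     return skeletons, skeleton_ids
-- ===== SOURCE B (Python) =====
-- def combine_refs(refs):
--     skeletons, skeleton_ids, owner = [], [], {}
--     for indices in refs:
--         sid = max((owner.get(x, -1) for x in indices), default=-1)
--         if sid == -1:
--             sid = len(skeletons)
--             skeletons.append(set())
--         skeletons[sid].update(indices)
--         skeleton_ids.append(sid)
--         for x in indices:
--             owner[x] = sid
--     return [sorted(s) for s in skeletons], skeleton_ids
-- ===== Notes on version B (the rewrite author's own statement) =====
-- stated objective: faster
-- what changed: Replaces A's per-ref rescan of every skeleton's whole element list by an incrementally maintained dict value->last-owning-skeleton-id (take the max over the ref's values) and per-skeleton sets, removing both inner scans.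
import Mathlib
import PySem

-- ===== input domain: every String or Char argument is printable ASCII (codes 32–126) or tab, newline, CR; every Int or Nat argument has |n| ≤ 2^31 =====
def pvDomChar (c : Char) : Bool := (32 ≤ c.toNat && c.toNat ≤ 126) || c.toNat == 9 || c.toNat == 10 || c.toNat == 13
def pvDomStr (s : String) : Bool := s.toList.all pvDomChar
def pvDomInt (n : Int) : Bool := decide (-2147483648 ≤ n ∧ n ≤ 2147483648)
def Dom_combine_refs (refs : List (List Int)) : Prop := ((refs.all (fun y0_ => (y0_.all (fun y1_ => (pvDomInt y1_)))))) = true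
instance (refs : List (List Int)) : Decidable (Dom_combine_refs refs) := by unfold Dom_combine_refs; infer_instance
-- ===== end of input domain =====

-- B replaces A's rescan of all skeletons per ref by an incrementally updated value→skeleton-id
-- dict (objective: faster, asymptotic). Return values only: Python A mutates the inner lists of
-- `refs` in place (extend); B does not.

-- ===== PORT A =====
-- A's inner loop: last index i of the skeletons whose list shares an element with indices, -1 if none
def lastMatch (indices : List Int) (skeletons : List (List Int)) : Int :=
  (PySem.List.enumerate skeletons).foldl
    (fun sid p => if indices.any (fun x => p.2.contains x) then p.1 else sid) (-1)

-- A's loop body over (skeletons, skeleton_ids)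
def combineStep (st : List (List Int) × List Int) (indices : List Int) :
    List (List Int) × List Int :=
  let sid := lastMatch indices st.1
  if sid = -1 then (st.1 ++ [indices], st.2 ++ [(st.1.length : Int)])
  else (st.1.modify sid.toNat (fun s => s ++ indices), st.2 ++ [sid])

def combine_refs (refs : List (List Int)) : List (List Int) × List Int :=
  let st := refs.foldl combineStep ([], [])
  (st.1.map (fun x => PySem.List.sorted (PySem.Set.ofList x) (fun v => v)), st.2)

-- ===== PORT B =====
-- B's loop body over (skeletons as sets, skeleton_ids, owner dict value → skeleton id)
def combineStepAlt (st : List (PySem.Set Int) × List Int × PySem.Dict Int Int)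
    (indices : List Int) : List (PySem.Set Int) × List Int × PySem.Dict Int Int :=
  let sid0 := indices.foldl (fun m x => max m (st.2.2.getD x (-1))) (-1)
  let sid := if sid0 = -1 then (st.1.length : Int) else sid0
  let skels := if sid0 = -1 then st.1 ++ [PySem.Set.empty] else st.1
  (skels.modify sid.toNat (fun s => PySem.Set.update s indices),
   st.2.1 ++ [sid],
   indices.foldl (fun d x => d.insert x sid) st.2.2)

def combine_refs_alt (refs : List (List Int)) : List (List Int) × List Int :=
  let st := refs.foldl combineStepAlt ([], [], PySem.Dict.empty)
  (st.1.map (fun s => PySem.List.sorted s (fun v => v)), st.2.1)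

-- ===== PRECONDITION & SPEC =====
def Spec_combine_refs (refs : List (List Int)) (out : List (List Int) × List Int) : Prop := out = combine_refs_alt refs
instance (refs : List (List Int)) (out : List (List Int) × List Int) : Decidable (Spec_combine_refs refs out) := by unfold Spec_combine_refs; infer_instance

-- ===== CLAIM (what is proved, stated in full; the proofs are below) =====
def Claim_equal_combine_refs : Prop := ∀ (refs : List (List Int)), Dom_combine_refs refs → Spec_combine_refs refs (combine_refs refs)

-- ===== LEMMAS AND PROOFS =====

-- `lastMatch` as a recursion on the length, over the membership predicate only
def lmAux (p : Nat → Bool) : Nat → Int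
  | 0 => -1
  | n+1 => if p n then (n : Int) else lmAux p n

def pA (indices : List Int) (sk : List (List Int)) (j : Nat) : Bool :=
  indices.any (fun x => (sk.getD j []).contains x)

theorem lmAux_neg (p : Nat → Bool) (n : Nat) : -1 ≤ lmAux p n := by
  induction n with
  | zero => simp [lmAux]
  | succ n ih => simp only [lmAux]; split <;> omega

theorem lmAux_lt (p : Nat → Bool) (n : Nat) : lmAux p n < (n : Int) := by
  induction n with
  | zero => simp [lmAux]
  | succ n ih => simp only [lmAux]; split <;> omega

theorem lmAux_congr (p q : Nat → Bool) (n : Nat) (h : ∀ k < n, p k = q k) :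
    lmAux p n = lmAux q n := by
  induction n with
  | zero => rfl
  | succ n ih =>
    simp only [lmAux, h n (Nat.lt_succ_self n)]
    rw [ih (fun k hk => h k (Nat.lt_succ_of_lt hk))]

theorem le_lmAux (p : Nat → Bool) (n k : Nat) (hp : p k = true) (hk : k < n) :
    (k : Int) ≤ lmAux p n := by
  induction n with
  | zero => omega
  | succ n ih =>
    simp only [lmAux]
    by_cases hkn : k = n
    · subst hkn; simp [hp]
    · have := ih (by omega)
      split <;> omega

theorem lmAux_mem (p : Nat → Bool) (n : Nat) (h : 0 ≤ lmAux p n) :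
    p (lmAux p n).toNat = true ∧ (lmAux p n).toNat < n := by
  induction n with
  | zero => simp [lmAux] at h
  | succ n ih =>
    simp only [lmAux] at h ⊢
    by_cases hp : p n = true
    · simp [hp]
    · simp only [Bool.not_eq_true] at hp
      simp only [hp, Bool.false_eq_true, if_false] at h ⊢
      obtain ⟨h1, h2⟩ := ih h
      exact ⟨h1, by omega⟩

theorem lmAux_eq_of (p : Nat → Bool) (n k : Nat) (hk : k < n) (hp : p k = true)
    (hmax : ∀ m, k < m → m < n → p m = false) : lmAux p n = (k : Int) := by
  induction n with
  | zero => omega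
  | succ n ih =>
    simp only [lmAux]
    by_cases hkn : k = n
    · subst hkn; simp [hp]
    · rw [hmax n (by omega) (by omega)]
      simp only [Bool.false_eq_true, if_false]
      exact ih (by omega) (fun m h1 h2 => hmax m h1 (by omega))

theorem lastMatch_nil (idx : List Int) : lastMatch idx [] = -1 := rfl

theorem lastMatch_snoc (idx : List Int) (sk : List (List Int)) (s : List Int) :
    lastMatch idx (sk ++ [s]) =
      if idx.any (fun x => s.contains x) then (sk.length : Int) else lastMatch idx sk := by
  simp only [lastMatch, PySem.List.enumerate_append, List.foldl_append]
  simp [PySem.List.enumerate]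

theorem lastMatch_eq_lmAux (idx : List Int) (sk : List (List Int)) :
    lastMatch idx sk = lmAux (pA idx sk) sk.length := by
  induction sk using List.reverseRecOn with
  | nil => rfl
  | append_singleton sk s ih =>
    rw [lastMatch_snoc, ih]
    simp only [List.length_append, List.length_singleton, lmAux]
    have h1 : pA idx (sk ++ [s]) sk.length = idx.any (fun x => s.contains x) := by
      simp only [pA, List.getD_eq_getElem?_getD,
        List.getElem?_append_right (Nat.le_refl _)]
      simp
    have h2 : lmAux (pA idx sk) sk.length = lmAux (pA idx (sk ++ [s])) sk.length := by
      apply lmAux_congr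
      intro k hk
      simp [pA, List.getD_eq_getElem?_getD, List.getElem?_append_left hk]
    rw [h1, h2]

theorem lastMatch_neg (idx : List Int) (sk : List (List Int)) : -1 ≤ lastMatch idx sk := by
  rw [lastMatch_eq_lmAux]; exact lmAux_neg _ _

theorem lastMatch_lt (idx : List Int) (sk : List (List Int)) :
    lastMatch idx sk < (sk.length : Int) := by
  rw [lastMatch_eq_lmAux]; exact lmAux_lt _ _

-- fold-of-max facts
theorem init_le_foldl_max (g : Int → Int) (idx : List Int) (a : Int) :
    a ≤ idx.foldl (fun m x => max m (g x)) a := by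
  induction idx generalizing a with
  | nil => simp
  | cons y ys ih =>
    simp only [List.foldl_cons]
    exact le_trans (le_max_left _ _) (ih _)

theorem le_foldl_max (g : Int → Int) (idx : List Int) (a x : Int) (hx : x ∈ idx) :
    g x ≤ idx.foldl (fun m x => max m (g x)) a := by
  induction idx generalizing a with
  | nil => simp at hx
  | cons y ys ih =>
    simp only [List.foldl_cons]
    rcases List.mem_cons.mp hx with h | h
    · subst h; exact le_trans (le_max_right _ _) (init_le_foldl_max _ _ _)
    · exact ih _ h

theorem foldl_max_le (g : Int → Int) (idx : List Int) (a c : Int) (ha : a ≤ c)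
    (h : ∀ x ∈ idx, g x ≤ c) : idx.foldl (fun m x => max m (g x)) a ≤ c := by
  induction idx generalizing a with
  | nil => simpa
  | cons y ys ih =>
    simp only [List.foldl_cons]
    exact ih _ (max_le ha (h y (List.mem_cons_self))) (fun x hx => h x (List.mem_cons_of_mem _ hx))

-- the per-value last owner is at most the last match of the whole list
theorem lastMatch_le_of_mem (idx : List Int) (sk : List (List Int)) (x : Int) (hx : x ∈ idx) :
    lastMatch [x] sk ≤ lastMatch idx sk := by
  by_cases h : 0 ≤ lastMatch [x] sk
  · rw [lastMatch_eq_lmAux] at h ⊢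
    rw [lastMatch_eq_lmAux]
    obtain ⟨hmem, hlt⟩ := lmAux_mem _ _ h
    simp only [pA, List.any_cons, List.any_nil, Bool.or_false] at hmem
    have hx1 : pA idx sk (lmAux (pA [x] sk) sk.length).toNat = true := by
      simp only [pA, List.any_eq_true]
      exact ⟨x, hx, hmem⟩
    have := le_lmAux _ _ _ hx1 hlt
    omega
  · have := lastMatch_neg idx sk
    omega

-- A's scan over skeletons = the max over indices of the per-value last owner
theorem lastMatch_eq_foldl_max (idx : List Int) (sk : List (List Int)) :
    lastMatch idx sk = idx.foldl (fun m x => max m (lastMatch [x] sk)) (-1) := by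
  apply le_antisymm
  · by_cases h : 0 ≤ lastMatch idx sk
    · have h' : 0 ≤ lmAux (pA idx sk) sk.length := by rw [← lastMatch_eq_lmAux]; exact h
      obtain ⟨hmemo, hlt⟩ := lmAux_mem _ _ h'
      simp only [pA, List.any_eq_true] at hmemo
      obtain ⟨x, hx, hcx⟩ := hmemo
      have hx1 : pA [x] sk (lmAux (pA idx sk) sk.length).toNat = true := by
        simp only [pA, List.any_cons, List.any_nil, Bool.or_false]
        exact hcx
      have h1 := le_lmAux _ _ _ hx1 hlt
      have e1 : lmAux (pA idx sk) sk.length = lastMatch idx sk := (lastMatch_eq_lmAux _ _).symm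
      have e2 : lmAux (pA [x] sk) sk.length = lastMatch [x] sk := (lastMatch_eq_lmAux _ _).symm
      rw [e1, e2] at h1
      have h2 : lastMatch [x] sk ≤ idx.foldl (fun m x => max m (lastMatch [x] sk)) (-1) :=
        le_foldl_max _ idx (-1) x hx
      omega
    · have h2 : (-1 : Int) ≤ idx.foldl (fun m x => max m (lastMatch [x] sk)) (-1) :=
        init_le_foldl_max _ idx (-1)
      have := lastMatch_neg idx sk
      omega
  · exact foldl_max_le _ idx (-1) _ (lastMatch_neg idx sk)
      (fun x hx => lastMatch_le_of_mem idx sk x hx)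

theorem getD_foldl_insert (d : PySem.Dict Int Int) (idx : List Int) (v x : Int) :
    (idx.foldl (fun d y => d.insert y v) d).getD x (-1) =
      if x ∈ idx then v else d.getD x (-1) := by
  induction idx generalizing d with
  | nil => simp
  | cons y ys ih =>
    simp only [List.foldl_cons, ih, PySem.Dict.getD_insert, List.mem_cons]
    by_cases h1 : x ∈ ys <;> by_cases h2 : x = y <;> simp [h1, h2]

theorem getD_modify {α : Type} (l : List α) (t j : Nat) (f : α → α) (d : α) :
    (l.modify t f).getD j d =
      if t = j ∧ j < l.length then f (l.getD j d) else l.getD j d := by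
  simp only [List.getD_eq_getElem?_getD, List.getElem?_modify]
  by_cases h : t = j
  · subst h
    by_cases hl : t < l.length
    · rw [List.getElem?_eq_getElem hl]; simp [hl]
    · rw [List.getElem?_eq_none (by omega)]; simp [hl]
  · have h' : ¬(t = j ∧ j < l.length) := fun hh => h hh.1
    simp only [h', if_false]
    cases l[j]? <;> simp [h]

theorem getD_snoc {α : Type} (l : List α) (a : α) (j : Nat) (d : α) :
    (l ++ [a]).getD j d = if j = l.length then a else l.getD j d := by
  simp only [List.getD_eq_getElem?_getD]
  by_cases h : j = l.length
  · subst h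
    rw [List.getElem?_append_right (Nat.le_refl _)]
    simp
  · by_cases hl : j < l.length
    · rw [List.getElem?_append_left hl]
      simp [h]
    · rw [List.getElem?_eq_none (by simp; omega), List.getElem?_eq_none (by omega)]
      simp [h]

-- the loop invariant tying A's state (sk) to B's state (bs, d)
def StInv (sk : List (List Int)) (bs : List (PySem.Set Int)) (d : PySem.Dict Int Int) : Prop :=
  bs.length = sk.length ∧
  (∀ j : Nat, (bs.getD j []).Nodup ∧ ∀ x : Int, x ∈ bs.getD j [] ↔ x ∈ sk.getD j []) ∧
  (∀ x : Int, d.getD x (-1) = lastMatch [x] sk)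

theorem step_inv (sk : List (List Int)) (bs : List (PySem.Set Int)) (d : PySem.Dict Int Int)
    (ids : List Int) (idx : List Int) (h : StInv sk bs d) :
    (combineStep (sk, ids) idx).2 = (combineStepAlt (bs, ids, d) idx).2.1 ∧
    StInv (combineStep (sk, ids) idx).1 (combineStepAlt (bs, ids, d) idx).1
        (combineStepAlt (bs, ids, d) idx).2.2 := by
  obtain ⟨hlen, hmem, hd⟩ := h
  have hsid : idx.foldl (fun m x => max m (d.getD x (-1))) (-1) = lastMatch idx sk := by
    rw [PySem.List.foldl_congr_mem idx _ (fun m x => max m (lastMatch [x] sk)) (-1)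
      (fun acc x _ => by rw [hd])]
    exact (lastMatch_eq_foldl_max idx sk).symm
  simp only [combineStep, combineStepAlt, hsid, hlen]
  by_cases hneg : lastMatch idx sk = -1
  · -- no overlap: a fresh skeleton is appended on both sides
    have hcond : (lastMatch idx sk = -1) = True := by simp [hneg]
    simp only [hcond, if_true, Int.toNat_natCast]
    refine ⟨by trivial, ?_, ?_, ?_⟩
    · simp [hlen]
    · intro j
      have e1 : ((bs ++ [(PySem.Set.empty : PySem.Set Int)]).modify sk.length
            (fun s => PySem.Set.update s idx)).getD j [] =
          if j = sk.length then PySem.Set.update PySem.Set.empty idx else bs.getD j [] := by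
        rw [getD_modify]
        by_cases hj : j = sk.length
        · subst hj
          rw [if_pos ⟨rfl, by simp [hlen]⟩, if_pos rfl, getD_snoc, if_pos hlen.symm]
        · rw [if_neg (fun hh => hj hh.1.symm), if_neg hj, getD_snoc,
            if_neg (by omega : ¬ j = bs.length)]
      have e2 : (sk ++ [idx]).getD j ([] : List Int) =
          if j = sk.length then idx else sk.getD j [] := getD_snoc sk idx j []
      rw [e1, e2]
      by_cases hj : j = sk.length
      · rw [if_pos hj, if_pos hj]
        rw [show (PySem.Set.empty : PySem.Set Int) = ([] : List Int) from rfl,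
          PySem.Set.update_nil_left]
        exact ⟨PySem.Set.nodup_ofList idx, fun x => PySem.Set.mem_ofList idx x⟩
      · rw [if_neg hj, if_neg hj]
        exact hmem j
    · intro x
      rw [getD_foldl_insert, hd x, lastMatch_snoc]
      by_cases hx : x ∈ idx
      · simp [hx]
      · simp [hx]
  · -- overlap: both sides merge into skeleton number (lastMatch idx sk)
    have h0 : 0 ≤ lastMatch idx sk := by have := lastMatch_neg idx sk; omega
    have hlt : lastMatch idx sk < (sk.length : Int) := lastMatch_lt idx sk
    have hcond : (lastMatch idx sk = -1) = False := by simp [hneg]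
    simp only [hcond, if_false]
    set v := lastMatch idx sk with hv
    set t := v.toNat with ht
    have htv : (t : Int) = v := Int.toNat_of_nonneg h0
    have htn : t < sk.length := by omega
    refine ⟨by trivial, ?_, ?_, ?_⟩
    · simp [hlen]
    · intro j
      rw [getD_modify, getD_modify, hlen]
      by_cases hj : t = j ∧ j < sk.length
      · rw [if_pos hj, if_pos hj]
        refine ⟨PySem.Set.nodup_update _ _ (hmem j).1, fun x => ?_⟩
        rw [PySem.Set.mem_update, List.mem_append, (hmem j).2 x]
      · rw [if_neg hj, if_neg hj]
        exact hmem j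
    · intro x
      rw [getD_foldl_insert]
      by_cases hx : x ∈ idx
      · rw [if_pos hx]
        rw [lastMatch_eq_lmAux, List.length_modify]
        rw [show lmAux (pA [x] (sk.modify t fun s => s ++ idx)) sk.length = (t : Int) from ?_]
        · omega
        · apply lmAux_eq_of _ _ _ htn
          · simp only [pA, List.any_cons, List.any_nil, Bool.or_false]
            rw [getD_modify, if_pos ⟨rfl, htn⟩]
            simp [hx]
          · intro m hm1 hm2
            simp only [pA, List.any_cons, List.any_nil, Bool.or_false]
            rw [getD_modify, if_neg (fun hh => by omega : ¬(t = m ∧ m < sk.length))]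
            by_cases hc : (sk.getD m []).contains x = true
            · exfalso
              have h1 : pA [x] sk m = true := by
                simp only [pA, List.any_cons, List.any_nil, Bool.or_false]; exact hc
              have h2 := le_lmAux _ _ _ h1 hm2
              rw [← lastMatch_eq_lmAux] at h2
              have h3 := lastMatch_le_of_mem idx sk x hx
              omega
            · simpa using hc
      · rw [if_neg hx, hd x, lastMatch_eq_lmAux, lastMatch_eq_lmAux, List.length_modify]
        apply lmAux_congr
        intro k hk
        simp only [pA, List.any_cons, List.any_nil, Bool.or_false]
        rw [getD_modify]
        by_cases hj : t = k ∧ k < sk.length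
        · rw [if_pos hj]
          have hcx : idx.contains x = false := by
            simp only [List.contains_eq_mem]
            exact decide_eq_false hx
          rw [List.contains_append, hcx, Bool.or_false]
        · rw [if_neg hj]

theorem loop_inv (refs : List (List Int)) (sk : List (List Int)) (bs : List (PySem.Set Int))
    (d : PySem.Dict Int Int) (ids : List Int) (h : StInv sk bs d) :
    (refs.foldl combineStep (sk, ids)).2 = (refs.foldl combineStepAlt (bs, ids, d)).2.1 ∧
    StInv (refs.foldl combineStep (sk, ids)).1 (refs.foldl combineStepAlt (bs, ids, d)).1
        (refs.foldl combineStepAlt (bs, ids, d)).2.2 := by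
  induction refs generalizing sk bs d ids with
  | nil => exact ⟨rfl, h⟩
  | cons r rs ih =>
    simp only [List.foldl_cons]
    obtain ⟨hids, hinv⟩ := step_inv sk bs d ids r h
    have goal' := ih (combineStep (sk, ids) r).1 (combineStepAlt (bs, ids, d) r).1
      (combineStepAlt (bs, ids, d) r).2.2 (combineStepAlt (bs, ids, d) r).2.1 hinv
    have eA : ((combineStep (sk, ids) r).1, (combineStepAlt (bs, ids, d) r).2.1)
        = combineStep (sk, ids) r := by rw [← hids]
    have eB : ((combineStepAlt (bs, ids, d) r).1, (combineStepAlt (bs, ids, d) r).2.1,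
        (combineStepAlt (bs, ids, d) r).2.2) = combineStepAlt (bs, ids, d) r := rfl
    rw [eA, eB] at goal'
    exact goal'

-- ===== VERDICT (by name: the statement is the Claim_ definition above) =====
theorem combine_refs_spec : Claim_equal_combine_refs := by
  intro refs _
  unfold Spec_combine_refs combine_refs combine_refs_alt
  have h := loop_inv refs [] [] PySem.Dict.empty []
    ⟨rfl, fun j => by simp, fun x => by simp [lastMatch_nil]⟩
  obtain ⟨hids, hlen, hmem, _⟩ := h
  refine Prod.ext ?_ hids
  apply List.ext_getElem (by simp [hlen])
  intro i h1 h2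
  have h1' : i < (List.foldl combineStep ([], []) refs).1.length := by simpa using h1
  have h2' : i < (List.foldl combineStepAlt ([], [], PySem.Dict.empty) refs).1.length := by
    simpa using h2
  simp only [List.getElem_map]
  have hnd : List.Nodup ((List.foldl combineStepAlt ([], [], PySem.Dict.empty) refs).1[i]'h2') := by
    have := (hmem i).1
    rwa [List.getD_eq_getElem?_getD, List.getElem?_eq_getElem h2', Option.getD_some] at this
  rw [PySem.List.sorted_id_eq_sorted_id_iff_perm]
  rw [List.perm_ext_iff_of_nodup (PySem.Set.nodup_ofList _) hnd]
  intro a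
  rw [PySem.Set.mem_ofList]
  have := (hmem i).2 a
  rw [List.getD_eq_getElem?_getD, List.getD_eq_getElem?_getD,
    List.getElem?_eq_getElem h2', List.getElem?_eq_getElem h1',
    Option.getD_some, Option.getD_some] at this
  exact this.symm
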